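-- pv_equiv track=rewrite | github.com/redhat-openstack/packstack | packstack/plugins/neutron_350.py | get_agent_type
-- ===== SOURCE A (Python) =====
-- def get_agent_type(config):
--     # The only real use case I can think of for multiples right now is to list
--     # "vlan,gre" or "vlan,vxlan" so that VLANs are used if available,
--     # but tunnels are used if not.
--     tenant_types = config.get('CONFIG_NEUTRON_ML2_TENANT_NETWORK_TYPES',
--                               "['local']").strip('[]')
--     tenant_types = [i.strip('"\'') for i in tenant_types.split(',')]
--
--     for i in ['gre', 'vxlan', 'vlan']:
--         if i in tenant_types:
--             return i
--     return tenant_types[0]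
-- ===== SOURCE B (Python) =====
-- def get_agent_type(config):
--     raw = config.get('CONFIG_NEUTRON_ML2_TENANT_NETWORK_TYPES',
--                      "['local']").strip('[]')
--     tenant_types = [i.strip('"\'') for i in raw.split(',')]
--
--     rank = {'gre': 0, 'vxlan': 1, 'vlan': 2}
--     best = None
--     for t in tenant_types:
--         r = rank.get(t)
--         if r is not None and (best is None or r < best[0]):
--             best = (r, t)
--     return best[1] if best is not None else tenant_types[0]
-- ===== Notes on version B (the rewrite author's own statement) =====
-- stated objective: alternative
-- what changed: Replaces the three sequential membership scans over tenant_types ('gre' in ..., 'vxlan' in ..., 'vlan' in ...) with a priority-rank dict and a single pass that tracks the smallest-rank element seen.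
import Mathlib
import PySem

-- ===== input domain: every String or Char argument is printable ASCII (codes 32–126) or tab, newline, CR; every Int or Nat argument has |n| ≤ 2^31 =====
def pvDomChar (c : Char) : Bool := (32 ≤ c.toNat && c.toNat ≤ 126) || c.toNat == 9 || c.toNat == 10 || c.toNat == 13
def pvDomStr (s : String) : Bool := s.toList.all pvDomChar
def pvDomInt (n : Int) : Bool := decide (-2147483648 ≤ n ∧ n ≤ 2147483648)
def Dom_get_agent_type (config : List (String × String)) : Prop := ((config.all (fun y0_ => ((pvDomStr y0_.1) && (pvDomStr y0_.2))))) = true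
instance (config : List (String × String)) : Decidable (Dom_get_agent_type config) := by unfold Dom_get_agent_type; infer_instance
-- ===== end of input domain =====

-- B replaces A's three sequential membership scans over tenant_types with a
-- priority-rank dict and one pass tracking the smallest-rank element (objective: alternative).


-- ===== PORT A =====
-- shared parse: config.get(...,"['local']").strip('[]'), split on ',', strip quotes
def pvParse (config : List (String × String)) : List String :=
  let raw := PySem.Str.stripChars
    (PySem.Dict.getD (PySem.Dict.mk config)
      "CONFIG_NEUTRON_ML2_TENANT_NETWORK_TYPES" "['local']") "[]"
  ((PySem.Str.split? raw ",").getD []).map (fun i => PySem.Str.stripChars i "\"'")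

def get_agent_type (config : List (String × String)) : String :=
  let tenant_types := pvParse config
  if "gre" ∈ tenant_types then "gre"
  else if "vxlan" ∈ tenant_types then "vxlan"
  else if "vlan" ∈ tenant_types then "vlan"
  else PySem.List.pyGetD tenant_types 0 ""   -- tenant_types[0]; split(',') is never empty

-- ===== PORT B =====
def pvRank : PySem.Dict String Int :=
  PySem.Dict.mk [("gre", 0), ("vxlan", 1), ("vlan", 2)]

def pvStep (b : Option (Int × String)) (t : String) : Option (Int × String) :=
  match PySem.Dict.get? pvRank t with
  | none => b
  | some r =>
    match b with
    | none => some (r, t)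
    | some (br, bt) => if r < br then some (r, t) else some (br, bt)

def get_agent_type_alt (config : List (String × String)) : String :=
  let tenant_types := pvParse config
  let best := tenant_types.foldl pvStep none
  match best with
  | some (_, t) => t
  | none => PySem.List.pyGetD tenant_types 0 ""

-- ===== PRECONDITION & SPEC =====
def Spec_get_agent_type (config : List (String × String)) (out : String) : Prop := out = get_agent_type_alt config
instance (config : List (String × String)) (out : String) : Decidable (Spec_get_agent_type config out) := by unfold Spec_get_agent_type; infer_instance

-- ===== CLAIM (what is proved, stated in full; the proofs are below) =====
def Claim_equal_get_agent_type : Prop := ∀ (config : List (String × String)), Dom_get_agent_type config → Spec_get_agent_type config (get_agent_type config)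

-- ===== LEMMAS AND PROOFS =====
-- characterization of B's single-pass loop: it ends in the highest-priority type present
theorem pvStep_foldl_char (ts : List String) (b : Option (Int × String))
    (hb : b = none ∨ b = some (0, "gre") ∨ b = some (1, "vxlan") ∨ b = some (2, "vlan")) :
    ts.foldl pvStep b =
      if b = some (0, "gre") ∨ "gre" ∈ ts then some (0, "gre")
      else if b = some (1, "vxlan") ∨ "vxlan" ∈ ts then some (1, "vxlan")
      else if b = some (2, "vlan") ∨ "vlan" ∈ ts then some (2, "vlan")
      else b := by
  induction ts generalizing b with
  | nil =>
    rcases hb with h | h | h | h <;> subst h <;> simp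
  | cons t ts ih =>
    simp only [List.foldl_cons]
    by_cases h1 : t = "gre"
    · subst h1
      have hstep : pvStep b "gre" = some (0, "gre") := by
        rcases hb with h | h | h | h <;> subst h <;> decide
      rw [hstep, ih _ (by right; left; rfl)]
      simp
    · by_cases h2 : t = "vxlan"
      · subst h2
        have hstep : pvStep b "vxlan" =
            if b = some (0, "gre") then some (0, "gre") else some (1, "vxlan") := by
          rcases hb with h | h | h | h <;> subst h <;> decide
        rw [hstep]
        by_cases hbg : b = some (0, "gre")
        · simp only [hbg]
          rw [ih _ (by right; left; rfl)]
          simp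
        · simp only [if_neg hbg]
          rw [ih _ (by right; right; left; rfl)]
          rcases hb with h | h | h | h <;> subst h <;> simp_all
      · by_cases h3 : t = "vlan"
        · subst h3
          have hstep : pvStep b "vlan" =
              if b = some (0, "gre") then some (0, "gre")
              else if b = some (1, "vxlan") then some (1, "vxlan")
              else some (2, "vlan") := by
            rcases hb with h | h | h | h <;> subst h <;> decide
          rw [hstep]
          by_cases hbg : b = some (0, "gre")
          · simp only [hbg]
            rw [ih _ (by right; left; rfl)]
            simp
          · by_cases hbx : b = some (1, "vxlan")
            · simp only [hbx]
              rw [ih _ (by right; right; left; rfl)]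
              simp_all
            · simp only [if_neg hbg, if_neg hbx]
              rw [ih _ (by right; right; right; rfl)]
              rcases hb with h | h | h | h <;> subst h <;> simp_all
        · have hr : PySem.Dict.get? pvRank t = none := by
            simp [pvRank, PySem.Dict.get?, List.find?,
              show ("gre" == t) = false by simp [Ne.symm h1],
              show ("vxlan" == t) = false by simp [Ne.symm h2],
              show ("vlan" == t) = false by simp [Ne.symm h3]]
          have hstep : pvStep b t = b := by simp [pvStep, hr]
          rw [hstep, ih _ hb]
          simp [List.mem_cons, Ne.symm h1, Ne.symm h2, Ne.symm h3]

-- ===== VERDICT (by name: the statement is the Claim_ definition above) =====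
theorem get_agent_type_spec : Claim_equal_get_agent_type := by
  intro config _
  unfold Spec_get_agent_type get_agent_type get_agent_type_alt
  simp only []
  rw [pvStep_foldl_char (pvParse config) none (Or.inl rfl)]
  by_cases hg : "gre" ∈ pvParse config <;>
    by_cases hx : "vxlan" ∈ pvParse config <;>
      by_cases hv : "vlan" ∈ pvParse config <;>
        simp [hg, hx, hv]
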